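-- pv_equiv track=rewrite | github.com/Deltams/GraphGame | task2/desktop_task2_V_2_0.py | check_user_input
-- ===== SOURCE A (Python) =====
-- def check_user_input(map_me, arr_user):
--     # Проверка "св-ва" для обхода в глубину
--     if len(arr_user) == 0 or len(arr_user) != len(map_me):
--         return False
--     # Проверяем на повторы
--     set_check = set()
--     for i in arr_user:
--         if i in set_check:
--             return False
--         set_check.add(i)
--     # Проверяем на содержание вершин только из списка смежности
--     for i in map_me:
--         if not i in arr_user:
--             return False
--     # Проверяем обход
--     tmp = arr_user[0]
--     set_check.remove(tmp)
--     stack_me = list()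
--     stack_me.append(tmp)
--     for i in range(1, len(arr_user)):
--         if arr_user[i] in map_me[tmp]:
--             tmp = arr_user[i]
--             set_check.remove(tmp)
--             stack_me.append(tmp)
--             while True:
--                 check = True
--                 for j in map_me[tmp]:
--                     if j in set_check:
--                         check = False
--                         break
--                 if check:
--                     if len(stack_me) <= 1:
--                         if len(arr_user)-1 == i:
--                             break
--                         return False
--                     stack_me.pop()
--                     tmp = stack_me[-1]
--                 else:
--                     break
--         else:
--             return False
--     return True
-- ===== SOURCE B (Python) =====
-- def check_user_input(map_me, arr_user):
--     # Same preamble checks, then a recursive DFS with a single cursor into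
--     # arr_user instead of the explicit stack + inner backtracking while-loop.
--     n = len(arr_user)
--     if n == 0 or n != len(map_me):
--         return False
--     if len(set(arr_user)) != n:
--         return False
--     if any(k not in arr_user for k in map_me):
--         return False
--     remaining = set(arr_user[1:])
--     pos = 1
--
--     def dfs(v):
--         nonlocal pos
--         # While v still has an unvisited neighbour, the next element of
--         # arr_user must be one of them; consume it and descend.
--         while any(u in remaining for u in map_me[v]):
--             w = arr_user[pos]
--             if w not in map_me[v]:
--                 return False
--             remaining.discard(w)
--             pos += 1
--             if not dfs(w):
--                 return False
--         return True
--
--     return dfs(arr_user[0]) and pos == n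
-- ===== Notes on version B (the rewrite author's own statement) =====
-- stated objective: alternative
-- what changed: The explicit stack with the inner backtracking while-loop is replaced by a recursive dfs(v) driven by a single cursor into arr_user (dfs consumes the next element while it is an unvisited neighbour of v and returns when v has none left); the preamble duplicate/key checks become set/any one-liners.
import Mathlib
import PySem

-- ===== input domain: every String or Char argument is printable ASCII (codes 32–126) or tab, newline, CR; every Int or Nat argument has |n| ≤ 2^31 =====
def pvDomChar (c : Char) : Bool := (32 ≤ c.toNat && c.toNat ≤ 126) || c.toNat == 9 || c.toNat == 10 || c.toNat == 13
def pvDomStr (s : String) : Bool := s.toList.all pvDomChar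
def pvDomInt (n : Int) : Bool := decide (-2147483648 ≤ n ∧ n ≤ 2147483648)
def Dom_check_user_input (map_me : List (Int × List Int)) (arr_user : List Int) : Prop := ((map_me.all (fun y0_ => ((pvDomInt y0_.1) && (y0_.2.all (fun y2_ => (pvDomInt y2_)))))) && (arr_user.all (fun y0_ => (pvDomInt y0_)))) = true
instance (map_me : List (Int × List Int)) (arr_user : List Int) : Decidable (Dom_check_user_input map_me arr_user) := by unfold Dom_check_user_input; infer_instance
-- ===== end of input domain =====

-- B replaces A's explicit stack + inner backtracking while-loop by a recursive DFS
-- driven by a single cursor into arr_user (objective: alternative decomposition).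

-- ===== PORT A =====

-- call boundary (both ports): map_me is a Python dict[int, list[int]]; its construction is Dict.ofList
-- map_me[v]; after the preamble checks the key is always present, so the [] default is never used (KeyError unreachable)
def pvAdj (d : PySem.Dict Int (List Int)) (v : Int) : List Int := d.getD v []

-- A's duplicate-check loop building set_check ('return False' = none)
def pvDupLoopA : List Int → PySem.Set Int → Option (PySem.Set Int)
  | [], s => some s
  | i :: t, s => if PySem.Set.contains s i then none else pvDupLoopA t (PySem.Set.add s i)

-- A's inner 'while True' backtracking loop; the Python stack is held top-first here
-- (stack_me[-1] is the head), lastHit = (i == len(arr_user)-1); none = 'return False'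
def pvBacktrackA (adj : Int → List Int) (sc : PySem.Set Int) (lastHit : Bool) :
    Int → List Int → Option (Int × List Int)
  | tmp, stack =>
    if (adj tmp).any (fun j => PySem.Set.contains sc j) then some (tmp, stack)  -- check = False: break
    else if stack.length ≤ 1 then (if lastHit then some (tmp, stack) else none)
    else
      match stack with
      | _ :: tmp2 :: rest2 => pvBacktrackA adj sc lastHit tmp2 (tmp2 :: rest2)  -- pop; tmp = stack_me[-1]
      | _ => none  -- unreachable: stack has ≥ 2 elements here

-- A's 'for i in range(1, len(arr_user))' over the remaining elements of arr_user
def pvLoopA (adj : Int → List Int) : Int → PySem.Set Int → List Int → List Int → Bool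
  | _, _, _, [] => true
  | tmp, sc, stack, x :: rest =>
    if x ∈ adj tmp then
      match PySem.Set.remove? sc x with
      | none => false  -- unreachable: set_check.remove never raises here (x not yet consumed)
      | some sc' =>
        match pvBacktrackA adj sc' rest.isEmpty x (x :: stack) with
        | none => false
        | some (tmp2, stack2) => pvLoopA adj tmp2 sc' stack2 rest
    else false

def check_user_input (map_me : List (Int × List Int)) (arr_user : List Int) : Bool :=
  let d := PySem.Dict.ofList map_me
  if arr_user.length = 0 ∨ arr_user.length ≠ d.size then false
  else
    match pvDupLoopA arr_user PySem.Set.empty with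
    | none => false
    | some set_check =>
      if d.keys.all (fun i => decide (i ∈ arr_user)) then
        match arr_user with
        | [] => false  -- unreachable: arr_user is nonempty
        | tmp :: rest =>
          match PySem.Set.remove? set_check tmp with
          | none => false  -- unreachable: tmp is in set_check
          | some sc => pvLoopA (pvAdj d) tmp sc [tmp] rest
      else false

-- ===== PORT B =====

-- B's recursive dfs(v); the cursor pos / arr_user[pos:] is the list rest, 'remaining' is rem.
-- none = 'return False'; the length bound on the returned rest only serves termination.
def pvDfsB (adj : Int → List Int) (v : Int) (rem : PySem.Set Int) (rest : List Int) :
    Option (PySem.Set Int × {r : List Int // r.length ≤ rest.length}) :=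
  if (adj v).any (fun u => PySem.Set.contains rem u) then
    match rest with
    | [] => none  -- unreachable: rem holds exactly the elements of rest
    | w :: rest' =>
      if w ∈ adj v then
        match pvDfsB adj w (PySem.Set.discard rem w) rest' with
        | none => none
        | some (rem2, ⟨rest2, h2⟩) =>
          match pvDfsB adj v rem2 rest2 with
          | none => none
          | some (rem3, ⟨rest3, h3⟩) => some (rem3, ⟨rest3, by simp; omega⟩)
      else none
  else some (rem, ⟨rest, Nat.le_refl _⟩)
termination_by rest.length
decreasing_by
  · simp
  · simp; omega

def check_user_input_alt (map_me : List (Int × List Int)) (arr_user : List Int) : Bool :=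
  let d := PySem.Dict.ofList map_me
  if arr_user.length = 0 ∨ arr_user.length ≠ d.size then false
  else if (PySem.Set.ofList arr_user).length ≠ arr_user.length then false  -- len(set(arr_user)) != n
  else if d.keys.any (fun k => !decide (k ∈ arr_user)) then false
  else
    match arr_user with
    | [] => false  -- unreachable: arr_user is nonempty
    | r :: rest =>
      match pvDfsB (pvAdj d) r (PySem.Set.ofList rest) rest with
      | none => false
      | some (_, ⟨rest', _⟩) => rest'.isEmpty  -- pos == n

-- ===== PRECONDITION & SPEC =====
def Spec_check_user_input (map_me : List (Int × List Int)) (arr_user : List Int) (out : Bool) : Prop := out = check_user_input_alt map_me arr_user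
instance (map_me : List (Int × List Int)) (arr_user : List Int) (out : Bool) : Decidable (Spec_check_user_input map_me arr_user out) := by unfold Spec_check_user_input; infer_instance

-- ===== CLAIM (what is proved, stated in full; the proofs are below) =====
def Claim_equal_check_user_input : Prop := ∀ (map_me : List (Int × List Int)) (arr_user : List Int), Dom_check_user_input map_me arr_user → Spec_check_user_input map_me arr_user (check_user_input map_me arr_user)

-- ===== LEMMAS AND PROOFS =====

-- B's computation resumed from a whole call stack of suspended dfs frames (top first):
-- pvRunB [v1, v2, …] rem rest finishes dfs(v1), then dfs(v2), … on the shared state.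
def pvRunB (adj : Int → List Int) : List Int → PySem.Set Int → List Int → Option (PySem.Set Int × List Int)
  | [], rem, rest => some (rem, rest)
  | v :: ss, rem, rest =>
    match pvDfsB adj v rem rest with
    | none => none
    | some (rem2, r2) => pvRunB adj ss rem2 r2.val

-- B's final verdict from the state left behind by the recursion (pos == n ↔ rest empty)
def pvResB : Option (PySem.Set Int × List Int) → Bool
  | none => false
  | some (_, r) => r.isEmpty

lemma pvSet_ofList_nodup (l : List Int) (h : l.Nodup) : PySem.Set.ofList l = l := by
  induction l using List.reverseRecOn with
  | nil => rfl
  | append_singleton t x ih =>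
    have h' : (x :: t).Nodup := ((List.perm_append_singleton x t).nodup_iff).mp h
    simp only [PySem.Set.ofList, List.foldl_append, List.foldl_cons, List.foldl_nil] at *
    rw [ih (List.nodup_cons.mp h').2]
    rw [PySem.Set.add_of_not_mem (List.nodup_cons.mp h').1]

lemma pvOfList_sublist (l : List Int) : List.Sublist (PySem.Set.ofList l) l := by
  induction l using List.reverseRecOn with
  | nil => simp [PySem.Set.ofList]
  | append_singleton t x ih =>
    simp only [PySem.Set.ofList, List.foldl_append, List.foldl_cons, List.foldl_nil] at *
    rw [PySem.Set.add_eq_ite]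
    split
    · exact ih.trans (List.sublist_append_left t [x])
    · exact ih.append (List.Sublist.refl [x])

lemma pvOfList_len_iff (l : List Int) : (PySem.Set.ofList l).length = l.length ↔ l.Nodup := by
  constructor
  · intro h
    have := (pvOfList_sublist l).eq_of_length h
    rw [← this]
    exact PySem.Set.nodup_ofList l
  · intro h; rw [pvSet_ofList_nodup l h]

lemma pvDupLoopA_some (l : List Int) : ∀ s : PySem.Set Int, l.Nodup → (∀ a ∈ l, a ∉ s) →
    pvDupLoopA l s = some (s ++ l) := by
  induction l with
  | nil => intro s _ _; simp [pvDupLoopA]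
  | cons i t ih =>
    intro s hnd hs
    have hi : i ∉ s := hs i (by simp)
    have hc : PySem.Set.contains s i = false := by
      simp [PySem.Set.contains_eq_listContains]; exact hi
    rw [pvDupLoopA, hc]
    simp only [Bool.false_eq_true, if_false]
    rw [PySem.Set.add_of_not_mem hi, ih (s ++ [i]) (List.nodup_cons.mp hnd).2]
    · simp
    · intro a ha
      simp only [List.mem_append, List.mem_singleton]
      rintro (h1 | rfl)
      · exact hs a (by simp [ha]) h1
      · exact (List.nodup_cons.mp hnd).1 ha

lemma pvDupLoopA_none (l : List Int) : ∀ s : PySem.Set Int, (¬ l.Nodup ∨ ∃ a ∈ l, a ∈ s) →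
    pvDupLoopA l s = none := by
  induction l with
  | nil => intro s h; rcases h with h | ⟨a, ha, _⟩ <;> simp_all
  | cons i t ih =>
    intro s h
    by_cases hc : PySem.Set.contains s i = true
    · rw [pvDupLoopA, hc]; simp
    · have hi : i ∉ s := by
        simp [PySem.Set.contains_eq_listContains] at hc; exact hc
      rw [pvDupLoopA]
      simp only [hc, Bool.false_eq_true, if_false]
      rw [PySem.Set.add_of_not_mem hi]
      apply ih
      rcases h with h | ⟨a, ha, has⟩
      · rw [List.nodup_cons] at h
        by_cases hit : i ∈ t
        · exact Or.inr ⟨i, hit, by simp⟩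
        · exact Or.inl (fun hnt => h ⟨hit, hnt⟩)
      · rcases List.mem_cons.mp ha with rfl | hat
        · exact absurd has hi
        · exact Or.inr ⟨a, hat, by simp [has]⟩

lemma pvContains_nil (u : Int) : PySem.Set.contains ([] : PySem.Set Int) u = false := rfl

lemma pvSet_contains_iff (s : PySem.Set Int) (x : Int) :
    PySem.Set.contains s x = true ↔ x ∈ s := by
  simp [PySem.Set.contains_eq_listContains]

lemma pvDiscard_cons (x : Int) (r : List Int) (h : x ∉ r) :
    PySem.Set.discard (x :: r) x = r := by
  simp only [PySem.Set.discard, List.filter_cons]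
  simp only [beq_self_eq_true, Bool.not_true, Bool.false_eq_true, if_false]
  exact List.filter_eq_self.mpr (fun y hy => by simp; exact fun e => h (e ▸ hy))

lemma pvRemove_cons (x : Int) (r : List Int) (h : x ∉ r) :
    PySem.Set.remove? (x :: r) x = some r := by
  simp only [PySem.Set.remove?]
  rw [if_pos (by rw [pvSet_contains_iff]; simp)]
  rw [pvDiscard_cons x r h]

-- unfoldings of A's inner while-loop
lemma pvBt_break (adj : Int → List Int) (sc : PySem.Set Int) (lastHit : Bool) (tmp : Int)
    (stack : List Int) (h : (adj tmp).any (fun j => PySem.Set.contains sc j) = true) :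
    pvBacktrackA adj sc lastHit tmp stack = some (tmp, stack) := by
  rw [pvBacktrackA.eq_def]
  dsimp only
  rw [if_pos h]

lemma pvBt_single (adj : Int → List Int) (sc : PySem.Set Int) (lastHit : Bool) (tmp s0 : Int)
    (h : (adj tmp).any (fun j => PySem.Set.contains sc j) = false) :
    pvBacktrackA adj sc lastHit tmp [s0] = if lastHit then some (tmp, [s0]) else none := by
  rw [pvBacktrackA.eq_def]
  dsimp only
  rw [if_neg (by simp only [h]; simp), if_pos (by simp)]

lemma pvBt_pop (adj : Int → List Int) (sc : PySem.Set Int) (lastHit : Bool) (tmp s0 s1 : Int)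
    (r2 : List Int) (h : (adj tmp).any (fun j => PySem.Set.contains sc j) = false) :
    pvBacktrackA adj sc lastHit tmp (s0 :: s1 :: r2) =
      pvBacktrackA adj sc lastHit s1 (s1 :: r2) := by
  rw [pvBacktrackA.eq_def]
  dsimp only
  rw [if_neg (by simp only [h]; simp), if_neg (by simp only [List.length_cons]; omega)]

-- pvDfsB unfoldings, phrased on pvRunB so the subtype stays hidden
lemma pvRunB_pop (adj : Int → List Int) (v : Int) (ss : List Int) (rem : PySem.Set Int)
    (rest : List Int) (h : (adj v).any (fun u => PySem.Set.contains rem u) = false) :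
    pvRunB adj (v :: ss) rem rest = pvRunB adj ss rem rest := by
  simp only [pvRunB]
  rw [pvDfsB.eq_def, if_neg (by simp only [h]; simp)]

lemma pvRunB_fail (adj : Int → List Int) (v : Int) (ss : List Int) (rem : PySem.Set Int)
    (w : Int) (rest' : List Int)
    (h1 : (adj v).any (fun u => PySem.Set.contains rem u) = true) (h2 : w ∉ adj v) :
    pvRunB adj (v :: ss) rem (w :: rest') = none := by
  simp only [pvRunB]
  rw [pvDfsB.eq_def, if_pos h1]
  dsimp only
  rw [if_neg h2]

lemma pvRunB_step (adj : Int → List Int) (v : Int) (ss : List Int) (rem : PySem.Set Int)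
    (w : Int) (rest' : List Int)
    (h1 : (adj v).any (fun u => PySem.Set.contains rem u) = true) (h2 : w ∈ adj v) :
    pvRunB adj (v :: ss) rem (w :: rest') =
      pvRunB adj (w :: v :: ss) (PySem.Set.discard rem w) rest' := by
  simp only [pvRunB]
  rw [pvDfsB.eq_def, if_pos h1]
  dsimp only
  rw [if_pos h2]
  rcases hD : pvDfsB adj w (PySem.Set.discard rem w) rest' with _ | ⟨rem2, ⟨rest2, hlen⟩⟩
  · rfl
  · dsimp only
    rcases hE : pvDfsB adj v rem2 rest2 with _ | ⟨rem3, ⟨rest3, hlen3⟩⟩ <;> rfl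

lemma pvRunB_nilset (adj : Int → List Int) : ∀ ss : List Int,
    pvRunB adj ss ([] : PySem.Set Int) [] = some ([], []) := by
  intro ss
  induction ss with
  | nil => rfl
  | cons v ss ih =>
    rw [pvRunB_pop adj v ss [] [] (by simp [pvContains_nil])]
    exact ih

-- the backtracking phase: A pops frames without an unvisited neighbour exactly while
-- B's suspended dfs frames return; IH is the main induction hypothesis at rest'
lemma pvPop (adj : Int → List Int) (rest' : List Int)
    (IH : ∀ (t : Int) (ss : List Int),
      (ss = [] ∨ (adj t).any (fun u => PySem.Set.contains rest' u) = true) →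
      pvLoopA adj t rest' (t :: ss) rest' = pvResB (pvRunB adj (t :: ss) rest' rest')) :
    ∀ (ss : List Int) (t : Int),
      (match pvBacktrackA adj rest' rest'.isEmpty t (t :: ss) with
       | none => false
       | some (t2, st2) => pvLoopA adj t2 rest' st2 rest') =
      pvResB (pvRunB adj (t :: ss) rest' rest') := by
  intro ss
  induction ss with
  | nil =>
    intro t
    by_cases hA : (adj t).any (fun u => PySem.Set.contains rest' u) = true
    · rw [pvBt_break adj rest' rest'.isEmpty t [t] hA]
      exact IH t [] (Or.inl rfl)
    · simp only [Bool.not_eq_true] at hA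
      rw [pvBt_single adj rest' rest'.isEmpty t t hA]
      by_cases hE : rest' = []
      · subst hE
        simp only [List.isEmpty_nil, if_true]
        exact IH t [] (Or.inl rfl)
      · rw [if_neg (by simp [hE])]
        rw [pvRunB_pop adj t [] rest' rest' hA]
        simp [pvRunB, pvResB, hE]
  | cons t2 ss' ih =>
    intro t
    by_cases hA : (adj t).any (fun u => PySem.Set.contains rest' u) = true
    · rw [pvBt_break adj rest' rest'.isEmpty t (t :: t2 :: ss') hA]
      exact IH t (t2 :: ss') (Or.inr hA)
    · simp only [Bool.not_eq_true] at hA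
      rw [pvBt_pop adj rest' rest'.isEmpty t t t2 ss' hA]
      rw [pvRunB_pop adj t (t2 :: ss') rest' rest' hA]
      exact ih t2

lemma pvMain (adj : Int → List Int) : ∀ (rest : List Int), rest.Nodup →
    ∀ (t : Int) (ss : List Int),
    (ss = [] ∨ (adj t).any (fun u => PySem.Set.contains rest u) = true) →
    pvLoopA adj t rest (t :: ss) rest = pvResB (pvRunB adj (t :: ss) rest rest) := by
  intro rest
  induction rest with
  | nil =>
    intro _ t ss _
    rw [pvRunB_nilset adj (t :: ss)]
    rfl
  | cons x rest' ih =>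
    intro hnd t ss hinv
    have hxr : x ∉ rest' := (List.nodup_cons.mp hnd).1
    have hnd' : rest'.Nodup := (List.nodup_cons.mp hnd).2
    by_cases hm : x ∈ adj t
    · have hA : (adj t).any (fun u => PySem.Set.contains (x :: rest') u) = true := by
        refine List.any_eq_true.mpr ⟨x, hm, ?_⟩
        simp [pvSet_contains_iff]
      simp only [pvLoopA]
      rw [if_pos hm, pvRemove_cons x rest' hxr]
      rw [pvRunB_step adj t ss (x :: rest') x rest' hA hm, pvDiscard_cons x rest' hxr]
      exact pvPop adj rest' (ih hnd') (t :: ss) x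
    · simp only [pvLoopA]
      rw [if_neg hm]
      rcases hinv with rfl | hA
      · by_cases hA : (adj t).any (fun u => PySem.Set.contains (x :: rest') u) = true
        · rw [pvRunB_fail adj t [] (x :: rest') x rest' hA hm]
          rfl
        · simp only [Bool.not_eq_true] at hA
          rw [pvRunB_pop adj t [] (x :: rest') (x :: rest') hA]
          simp [pvRunB, pvResB]
      · rw [pvRunB_fail adj t ss (x :: rest') x rest' hA hm]
        rfl

-- ===== VERDICT (by name: the statement is the Claim_ definition above) =====
theorem check_user_input_spec : Claim_equal_check_user_input := by
  intro map_me arr_user _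
  unfold Spec_check_user_input
  rcases arr_user with _ | ⟨t, rest⟩
  · simp [check_user_input, check_user_input_alt]
  · by_cases h0 : (t :: rest).length = 0 ∨ (t :: rest).length ≠ (PySem.Dict.ofList map_me).size
    · simp only [check_user_input, check_user_input_alt]
      rw [if_pos h0, if_pos h0]
    · by_cases hnd : (t :: rest).Nodup
      · have hxr : t ∉ rest := (List.nodup_cons.mp hnd).1
        have e1 : pvDupLoopA (t :: rest) PySem.Set.empty = some (t :: rest) := by
          have := pvDupLoopA_some (t :: rest) PySem.Set.empty hnd
            (by intro a _; simp [PySem.Set.empty])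
          simpa [PySem.Set.empty] using this
        have e2 : PySem.Set.ofList (t :: rest) = t :: rest := pvSet_ofList_nodup _ hnd
        have e3 : PySem.Set.ofList rest = rest := pvSet_ofList_nodup _ (List.nodup_cons.mp hnd).2
        simp only [check_user_input, check_user_input_alt]
        rw [if_neg h0, if_neg h0, e1]
        rw [if_neg (by rw [e2]; simp)]
        simp only []
        by_cases hk : ((PySem.Dict.ofList map_me).keys.all fun i => decide (i ∈ t :: rest)) = true
        · rw [if_pos hk]
          rw [if_neg (by rw [List.all_eq_not_any_not] at hk; simp at hk ⊢; exact hk)]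
          rw [pvRemove_cons t rest hxr, e3]
          dsimp only
          rw [pvMain (pvAdj (PySem.Dict.ofList map_me)) rest (List.nodup_cons.mp hnd).2 t []
            (Or.inl rfl)]
          rcases hD : pvDfsB (pvAdj (PySem.Dict.ofList map_me)) t rest rest with _ | ⟨rem2, ⟨rest2, hl⟩⟩
          · simp [pvRunB, hD, pvResB]
          · simp [pvRunB, hD, pvResB]
        · rw [if_neg hk]
          rw [if_pos (by rw [List.all_eq_not_any_not] at hk; simp at hk ⊢; exact hk)]
      · have e1 : pvDupLoopA (t :: rest) PySem.Set.empty = none :=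
          pvDupLoopA_none (t :: rest) PySem.Set.empty (Or.inl hnd)
        simp only [check_user_input, check_user_input_alt]
        rw [if_neg h0, if_neg h0, e1]
        rw [if_pos (by rw [Ne, pvOfList_len_iff]; exact hnd)]
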